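-- pv_equiv track=rewrite | github.com/XenonMolecule/CS-Principles-Work | random/vigenere_cracker.py | shift_msg
-- ===== SOURCE A (Python) =====
-- alphabet = "ABCDEFGHIJKLMNOPQRSTUVWXYZ_ABCDEFGHIJKLMNOPQRSTUVWXYZ"
--
-- key_len = 10
--
-- def shift_msg(msg_chunks, shift_offset) :
--     chunks = [""] * key_len * len(msg_chunks)
--     for i in range(key_len):
--         j = 0
--         for chunk in msg_chunks:
--             if(len(chunk) > i):
--                 chunks[(j * key_len) + i] = alphabet[alphabet.find(chunk[i]) + shift_offset[i]]
--                 j+=1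
--     return "".join(chunks)
-- ===== SOURCE B (Python) =====
-- alphabet = "ABCDEFGHIJKLMNOPQRSTUVWXYZ_ABCDEFGHIJKLMNOPQRSTUVWXYZ"
--
-- key_len = 10
--
-- def shift_msg(msg_chunks, shift_offset):
--     # Build the shifted characters column by column (chunk-outer), then emit
--     # them with a transpose-shaped row-major pass.
--     cols = [[] for _ in range(key_len)]
--     for chunk in msg_chunks:
--         for i in range(min(len(chunk), key_len)):
--             cols[i].append(alphabet[alphabet.find(chunk[i]) + shift_offset[i]])
--     out = []
--     for row in range(len(msg_chunks)):
--         for i in range(key_len):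
--             if row < len(cols[i]):
--                 out.append(cols[i][row])
--     return "".join(out)
-- ===== Notes on version B (the rewrite author's own statement) =====
-- stated objective: alternative
-- what changed: B builds an explicit per-column table of shifted characters by iterating chunks (chunk-outer) and then emits the result with a separate transpose-shaped row-major pass, instead of A's single i-outer pass that scatters writes into a flat pre-allocated strided array via a per-column counter.
import Mathlib
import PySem

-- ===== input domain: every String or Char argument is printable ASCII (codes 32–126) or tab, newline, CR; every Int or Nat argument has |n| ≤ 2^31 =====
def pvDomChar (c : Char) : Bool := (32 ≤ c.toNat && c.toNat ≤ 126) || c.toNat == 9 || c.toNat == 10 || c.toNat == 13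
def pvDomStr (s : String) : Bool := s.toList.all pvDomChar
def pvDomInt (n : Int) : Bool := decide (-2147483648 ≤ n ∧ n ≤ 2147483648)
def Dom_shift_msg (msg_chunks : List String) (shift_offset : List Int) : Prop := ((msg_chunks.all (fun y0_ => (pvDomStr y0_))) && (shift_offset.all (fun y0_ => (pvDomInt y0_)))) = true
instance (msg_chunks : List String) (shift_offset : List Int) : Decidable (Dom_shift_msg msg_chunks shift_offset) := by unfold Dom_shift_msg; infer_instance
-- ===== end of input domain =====

-- B builds an explicit per-column table of shifted characters (chunk-outer) and emits it
-- with a separate transpose-shaped row-major pass, instead of A's strided scatter-writes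
-- into a flat pre-allocated array; alternative decomposition, similar cost.


-- ===== PORT A =====
-- module constants: alphabet (as List Char) and key_len
def pvAlpha : List Char := "ABCDEFGHIJKLMNOPQRSTUVWXYZ_ABCDEFGHIJKLMNOPQRSTUVWXYZ".toList

def pvKeyLen : Nat := 10

-- alphabet[alphabet.find(c) + off]  (none exactly where Python raises IndexError)
def pvShiftChar? (c : Char) (off : Int) : Option Char :=
  PySem.List.pyGet? pvAlpha (PySem.Chars.find pvAlpha [c] + off)

-- one step of A's inner 'for chunk in msg_chunks' loop for column i; state = (j, chunks array)
def pvColStepA (so : List Int) (i : Nat) (st : Option (Nat × List String)) (chunk : String) :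
    Option (Nat × List String) :=
  match st with
  | none => none
  | some (j, arr) =>
    if i < chunk.toList.length then
      match PySem.List.pyGet? so (i : Int) with
      | none => none
      | some off =>
        match pvShiftChar? (chunk.toList.getD i ' ') off with
        | none => none
        | some c => some (j + 1, arr.set (j * pvKeyLen + i) (String.singleton c))
    else some (j, arr)

def shift_msg (msg_chunks : List String) (shift_offset : List Int) : String :=
  match (List.range pvKeyLen).foldl (fun acc i =>
      match acc with
      | none => none
      | some arr => (msg_chunks.foldl (pvColStepA shift_offset i) (some (0, arr))).map Prod.snd)
      (some (List.replicate (pvKeyLen * msg_chunks.length) "")) with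
  | some arr => PySem.Str.join "" arr
  | none => ""   -- unreachable under Pre_

-- ===== PORT B =====
-- one step of B's inner 'for i in range(min(len(chunk), key_len))' loop; state = cols
def pvColStepB (so : List Int) (chunk : List Char) (acc : Option (List (List Char))) (i : Nat) :
    Option (List (List Char)) :=
  match acc with
  | none => none
  | some cols =>
    match PySem.List.pyGet? so (i : Int) with
    | none => none
    | some off =>
      match pvShiftChar? (chunk.getD i ' ') off with
      | none => none
      | some c => some (cols.set i (cols.getD i [] ++ [c]))

def shift_msg_alt (msg_chunks : List String) (shift_offset : List Int) : String :=
  match msg_chunks.foldl (fun acc chunk =>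
      (List.range (min chunk.toList.length pvKeyLen)).foldl (pvColStepB shift_offset chunk.toList) acc)
      (some (List.replicate pvKeyLen [])) with
  | none => ""   -- unreachable under Pre_
  | some cols =>
    String.ofList ((List.range msg_chunks.length).foldl (fun out row =>
      (List.range pvKeyLen).foldl (fun out2 i =>
        if row < (cols.getD i []).length then out2 ++ [(cols.getD i []).getD row ' '] else out2)
        out) [])

-- ===== PRECONDITION & SPEC =====
-- Pre_ excludes exactly the inputs where Python A raises: a column index i reached by some
-- chunk but out of range for shift_offset (IndexError), or a shifted alphabet index outside
-- [-53, 53) (IndexError on alphabet).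
def Pre_shift_msg (msg_chunks : List String) (shift_offset : List Int) : Prop :=
  ∀ chunk ∈ msg_chunks, ∀ i < min chunk.toList.length pvKeyLen,
    i < shift_offset.length ∧
    -53 ≤ PySem.Chars.find pvAlpha [chunk.toList.getD i ' '] + shift_offset.getD i 0 ∧
    PySem.Chars.find pvAlpha [chunk.toList.getD i ' '] + shift_offset.getD i 0 < 53

instance (msg_chunks : List String) (shift_offset : List Int) : Decidable (Pre_shift_msg msg_chunks shift_offset) := by
  unfold Pre_shift_msg; infer_instance

def pvWitness_shift_msg : List String × List Int := (["HELLO", "WORLD_AB", "Z"], [1, 2, 3, -1, 0, 5, 6, 7])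

def Spec_shift_msg (msg_chunks : List String) (shift_offset : List Int) (out : String) : Prop := out = shift_msg_alt msg_chunks shift_offset
instance (msg_chunks : List String) (shift_offset : List Int) (out : String) : Decidable (Spec_shift_msg msg_chunks shift_offset out) := by unfold Spec_shift_msg; infer_instance

-- ===== CLAIM (what is proved, stated in full; the proofs are below) =====
def Claim_equal_shift_msg : Prop := ∀ (msg_chunks : List String) (shift_offset : List Int), Dom_shift_msg msg_chunks shift_offset → Pre_shift_msg msg_chunks shift_offset → Spec_shift_msg msg_chunks shift_offset (shift_msg msg_chunks shift_offset)

-- ===== LEMMAS AND PROOFS =====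

-- helper spec functions
theorem pvPyGet?_some (xs : List Char) (v : Int) (h1 : -(xs.length:Int) ≤ v) (h2 : v < xs.length) : ∃ c, PySem.List.pyGet? xs v = some c := by
  unfold PySem.List.pyGet? PySem.List.pyIdx?
  split
  · rename_i h
    exact ⟨xs[v.toNat]'(by omega), by simp [*]⟩
  · rename_i h
    refine ⟨xs[(xs.length + v).toNat]'(by omega), ?_⟩
    simp only [Option.bind_some]
    rw [List.getElem?_eq_getElem (by omega)]
    congr 2
    omega

-- the combined shift of column i of a chunk (none exactly where A/B raise)
def pvShift (so : List Int) (i : Nat) (ch : List Char) : Option Char :=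
  match PySem.List.pyGet? so (i : Int) with
  | none => none
  | some off => pvShiftChar? (ch.getD i ' ') off

-- column i of the shifted table
def pvCol (so : List Int) (i : Nat) (mc : List String) : List Char :=
  mc.filterMap (fun ch => if i < ch.toList.length then pvShift so i ch.toList else none)

theorem pvShift_some (so : List Int) (mc : List String) (hPre : Pre_shift_msg mc so)
    (ch : String) (hch : ch ∈ mc) (i : Nat) (hi1 : i < ch.toList.length) (hi2 : i < pvKeyLen) :
    ∃ c, pvShift so i ch.toList = some c := by
  obtain ⟨h1, h2, h3⟩ := hPre ch hch i (by omega)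
  have hlen : ((53:Nat) : Int) = (pvAlpha.length : Int) := by decide
  unfold pvShift
  rw [show PySem.List.pyGet? so (i : Int) = some (so.getD i 0) by
    rw [PySem.List.pyGet?_natCast, List.getElem?_eq_getElem h1]
    simp [List.getD_eq_getElem?_getD, List.getElem?_eq_getElem h1]]
  exact pvPyGet?_some _ _ (by rw [← hlen]; push_cast; omega) (by rw [← hlen]; push_cast; omega)

theorem pvCol_le (so : List Int) (i : Nat) (mc : List String) : (pvCol so i mc).length ≤ mc.length :=
  List.length_filterMap_le _ _

theorem pvCol_append (so : List Int) (i : Nat) (mc : List String) (ch : String) :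
    pvCol so i (mc ++ [ch]) = pvCol so i mc ++
      (if i < ch.toList.length then (pvShift so i ch.toList).toList else []) := by
  by_cases h : i < ch.toList.length
  · cases hc : pvShift so i ch.toList <;>
      simp [pvCol, List.filterMap_append, hc, Option.toList,
        show i < ch.length from by simpa using h]
  · simp [pvCol, List.filterMap_append,
      show ¬ i < ch.length from by simpa using h]

-- A-side: the writes of one column pass
def pvWriteCol (i j0 : Nat) (col : List Char) (arr : List String) : List String :=
  match col with
  | [] => arr
  | c :: cs => pvWriteCol i (j0+1) cs (arr.set (j0 * pvKeyLen + i) (String.singleton c))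

theorem pvWriteCol_length (i : Nat) : ∀ (col : List Char) (j0 : Nat) (arr : List String),
    (pvWriteCol i j0 col arr).length = arr.length := by
  intro col
  induction col with
  | nil => intro j0 arr; rfl
  | cons c cs ih => intro j0 arr; rw [pvWriteCol, ih]; simp

theorem foldA_eq (so : List Int) (i : Nat) (mc : List String)
    (hsome : ∀ ch ∈ mc, i < ch.toList.length → ∃ c, pvShift so i ch.toList = some c) :
    ∀ (j0 : Nat) (arr : List String),
    mc.foldl (pvColStepA so i) (some (j0, arr)) =
      some (j0 + (pvCol so i mc).length, pvWriteCol i j0 (pvCol so i mc) arr) := by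
  induction mc with
  | nil => intro j0 arr; simp [pvCol, pvWriteCol]
  | cons ch rest ih =>
    intro j0 arr
    by_cases h : i < ch.toList.length
    · obtain ⟨c, hc⟩ := hsome ch (by simp) h
      obtain ⟨off, hoff, hsc⟩ : ∃ off, PySem.List.pyGet? so (i : Int) = some off ∧
          pvShiftChar? (ch.toList.getD i ' ') off = some c := by
        revert hc; unfold pvShift
        cases hg : PySem.List.pyGet? so (i : Int) <;> intro hc
        · cases hc
        · exact ⟨_, rfl, hc⟩
      have hstep : pvColStepA so i (some (j0, arr)) ch =
          some (j0 + 1, arr.set (j0 * pvKeyLen + i) (String.singleton c)) := by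
        simp [pvColStepA, show i < ch.length from by simpa using h, hoff,
          -List.getD_eq_getElem?_getD, hsc]
      have hcol : pvCol so i (ch :: rest) = c :: pvCol so i rest := by
        unfold pvCol
        rw [List.filterMap_cons]
        simp [show i < ch.length from by simpa using h, hc]
      rw [List.foldl_cons, hstep, ih (fun x hx => hsome x (by simp [hx]) ) (j0+1), hcol,
        pvWriteCol]
      congr 2
      simp
      omega
    · have hstep : pvColStepA so i (some (j0, arr)) ch = some (j0, arr) := by
        simp [pvColStepA, show ¬ i < ch.length from by simpa using h]
      have hcol : pvCol so i (ch :: rest) = pvCol so i rest := by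
        unfold pvCol; rw [List.filterMap_cons]
        simp [show ¬ i < ch.length from by simpa using h]
      rw [List.foldl_cons, hstep, ih (fun x hx => hsome x (by simp [hx]))]
      rw [hcol]

theorem pvWriteCol_getElem? (i : Nat) (hi : i < pvKeyLen) (n : Nat) :
    ∀ (col : List Char) (j0 : Nat) (arr : List String), arr.length = pvKeyLen * n →
    j0 + col.length ≤ n → ∀ k, k < pvKeyLen * n →
    (pvWriteCol i j0 col arr)[k]? =
      if k % pvKeyLen = i ∧ j0 ≤ k / pvKeyLen ∧ k / pvKeyLen < j0 + col.length
      then some (String.singleton (col.getD (k / pvKeyLen - j0) ' '))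
      else arr[k]? := by
  intro col
  induction col with
  | nil =>
    intro j0 arr hlen hle k hk
    rw [pvWriteCol, if_neg (by simp only [List.length_nil]; omega)]
  | cons c cs ih =>
    intro j0 arr hlen hle k hk
    rw [pvWriteCol, ih (j0+1) _ (by simpa using hlen) (by simp at hle ⊢; omega) k hk]
    simp only [pvKeyLen] at hlen hle hk ⊢
    have hdm := Nat.div_add_mod k 10
    by_cases hrem : k % 10 = i
    · by_cases hq1 : j0 + 1 ≤ k / 10 ∧ k / 10 < j0 + 1 + cs.length
      · rw [if_pos ⟨hrem, hq1.1, hq1.2⟩, if_pos ⟨hrem, by omega, by simp only [List.length_cons]; omega⟩]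
        have h10 : k / 10 - j0 = (k / 10 - (j0+1)) + 1 := by omega
        rw [h10]
        simp
      · rw [if_neg (by tauto)]
        by_cases hq0 : k / 10 = j0
        · have hkey : j0 * 10 + i = k := by
            have hi10 : i < 10 := by simpa [pvKeyLen] using hi
            omega
          rw [if_pos ⟨hrem, by omega, by simp only [List.length_cons]; omega⟩]
          rw [List.getElem?_set, if_pos hkey]
          rw [if_pos (by omega)]
          simp [hq0]
        · rw [if_neg (by simp only [List.length_cons]; intro hcon; omega)]
          rw [List.getElem?_set, if_neg (by omega)]
    · rw [if_neg (by tauto), if_neg (by tauto)]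
      have hi10 : i < 10 := by simpa [pvKeyLen] using hi
      rw [List.getElem?_set, if_neg (by omega)]

-- the flat row-major table both programs produce
def pvPad (col : List Char) (r : Nat) : List Char :=
  if r < col.length then [col.getD r ' '] else []

def pvRows (so : List Int) (mc : List String) : List (List Char) :=
  (List.range mc.length).flatMap (fun r => (List.range 10).map (fun i => pvPad (pvCol so i mc) r))

theorem flatMap_range_length {β : Type} (f : Nat → Nat → β) :
    ∀ n, ((List.range n).flatMap (fun r => (List.range 10).map (f r))).length = 10 * n := by
  intro n
  induction n with
  | zero => simp
  | succ m ih =>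
    rw [show List.range (m+1) = List.range m ++ [m] from List.range_succ]
    simp [ih]; ring

theorem flatMap_range_getElem? {β : Type} (f : Nat → Nat → β) :
    ∀ n k, k < 10 * n →
    ((List.range n).flatMap (fun r => (List.range 10).map (f r)))[k]? = some (f (k / 10) (k % 10)) := by
  intro n
  induction n with
  | zero => intro k hk; omega
  | succ m ih =>
    intro k hk
    rw [show List.range (m+1) = List.range m ++ [m] from List.range_succ, List.flatMap_append]
    by_cases h : k < 10 * m
    · rw [List.getElem?_append_left (by rw [flatMap_range_length]; exact h), ih k h]
    · rw [List.getElem?_append_right (by rw [flatMap_range_length]; omega)]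
      rw [flatMap_range_length]
      have h1 : (k - 10 * m) < 10 := by omega
      have h2 : k / 10 = m := by omega
      have h3 : k % 10 = k - 10 * m := by omega
      simp [List.getElem?_map, List.getElem?_range h1, h2, h3]

def pvCellS (so : List Int) (mc : List String) (k : Nat) : String :=
  if k / 10 < (pvCol so (k % 10) mc).length
  then String.singleton ((pvCol so (k % 10) mc).getD (k / 10) ' ') else ""

theorem pvJoin_nil_flatten (L : List (List Char)) : PySem.Chars.join [] L = L.flatten := by
  induction L with
  | nil => simp [PySem.Chars.join, List.intercalate]
  | cons a t ih =>
    cases t with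
    | nil => simp [PySem.Chars.join, List.intercalate]
    | cons b t' =>
      simp only [PySem.Chars.join] at *
      rw [show (b :: t' : List (List Char)) = [b] ++ t' from rfl] at *
      simp [List.intercalate] at ih ⊢
      simp [ih]

theorem foldA_all (so : List Int) (mc : List String)
    (hs : ∀ i, i < pvKeyLen → ∀ ch ∈ mc, i < ch.toList.length → ∃ c, pvShift so i ch.toList = some c) :
    ∀ m, m ≤ 10 → ∃ arr,
    (List.range m).foldl (fun acc i =>
      match acc with
      | none => none
      | some arr => (mc.foldl (pvColStepA so i) (some (0, arr))).map Prod.snd)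
      (some (List.replicate (pvKeyLen * mc.length) "")) = some arr ∧
    arr.length = 10 * mc.length ∧
    ∀ k, k < 10 * mc.length → arr[k]? = some (if k % 10 < m then pvCellS so mc k else "") := by
  intro m
  induction m with
  | zero =>
    intro _
    refine ⟨List.replicate (pvKeyLen * mc.length) "", by simp, by simp [pvKeyLen], ?_⟩
    intro k hk
    rw [List.getElem?_replicate, if_pos (by simpa [pvKeyLen] using hk)]
    simp
  | succ m ih =>
    intro hm
    obtain ⟨arr, hfold, hlen, hget⟩ := ih (by omega)
    refine ⟨pvWriteCol m 0 (pvCol so m mc) arr, ?_, ?_, ?_⟩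
    · rw [show List.range (m+1) = List.range m ++ [m] from List.range_succ, List.foldl_append,
        hfold]
      simp only [List.foldl_cons, List.foldl_nil]
      rw [foldA_eq so m mc (hs m (by simp [pvKeyLen]; omega)) 0 arr]
      simp
    · rw [pvWriteCol_length, hlen]
    · intro k hk
      rw [pvWriteCol_getElem? m (by simp [pvKeyLen]; omega) mc.length (pvCol so m mc) 0 arr
        (by simp [pvKeyLen, hlen]) (by simpa using pvCol_le so m mc) k (by simpa [pvKeyLen] using hk)]
      simp only [pvKeyLen]
      have hmlt : k % 10 < 10 := Nat.mod_lt _ (by norm_num)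
      by_cases hrem : k % 10 = m
      · by_cases hq : k / 10 < (pvCol so m mc).length
        · rw [if_pos ⟨hrem, by omega, by omega⟩]
          rw [if_pos (by omega)]
          simp [pvCellS, hrem, hq]
        · rw [if_neg (by intro hcon; omega), hget k hk,
            if_neg (by omega), if_pos (by omega)]
          simp [pvCellS, hrem, hq]
      · rw [if_neg (by tauto), hget k hk]
        by_cases hlt : k % 10 < m
        · rw [if_pos hlt, if_pos (by omega)]
        · rw [if_neg hlt, if_neg (by omega)]

theorem shiftA_toList (so : List Int) (mc : List String)
    (hs : ∀ i, i < pvKeyLen → ∀ ch ∈ mc, i < ch.toList.length → ∃ c, pvShift so i ch.toList = some c) :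
    (shift_msg mc so).toList = (pvRows so mc).flatten := by
  obtain ⟨arr, hfold, hlen, hget⟩ := foldA_all so mc hs 10 (by omega)
  unfold shift_msg
  rw [show pvKeyLen = 10 from rfl] at hfold ⊢
  rw [hfold]
  simp only [PySem.Str.toList_join]
  rw [show "".toList = ([] : List Char) from rfl, pvJoin_nil_flatten]
  congr 1
  unfold pvRows
  apply List.ext_getElem?
  intro k
  by_cases hk : k < 10 * mc.length
  · rw [List.getElem?_map, hget k hk, flatMap_range_getElem? _ mc.length k hk]
    have : k % 10 < 10 := Nat.mod_lt _ (by norm_num)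
    simp only [Option.map_some, pvCellS, pvPad]
    by_cases h : k / 10 < (pvCol so (k % 10) mc).length <;> simp [h, this]
  · rw [List.getElem?_eq_none (by simpa [hlen] using hk),
      List.getElem?_eq_none (by rw [flatMap_range_length]; omega)]

-- B-side: one chunk's inner loop appends its shifted chars to the first min(len,10) columns
theorem foldB_inner (so : List Int) (ch : List Char) :
    ∀ m, m ≤ 10 → (∀ i, i < m → ∃ c, pvShift so i ch = some c) →
    ∀ cols : List (List Char), cols.length = 10 →
    ∃ cols', (List.range m).foldl (pvColStepB so ch) (some cols) = some cols' ∧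
      cols'.length = 10 ∧
      ∀ t, t < 10 → cols'[t]? =
        if t < m then some (cols.getD t [] ++ [(pvShift so t ch).getD ' ']) else cols[t]? := by
  intro m
  induction m with
  | zero =>
    intro _ _ cols hcols
    exact ⟨cols, by simp, hcols, fun t ht => by rw [if_neg (by omega)]⟩
  | succ m ih =>
    intro hm hsome cols hcols
    obtain ⟨cols0, hfold, hlen0, hget0⟩ := ih (by omega) (fun i hi => hsome i (by omega)) cols hcols
    obtain ⟨c, hc⟩ := hsome m (by omega)
    obtain ⟨off, hoff, hsc⟩ : ∃ off, PySem.List.pyGet? so (m : Int) = some off ∧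
        pvShiftChar? (ch.getD m ' ') off = some c := by
      revert hc; unfold pvShift
      cases hg : PySem.List.pyGet? so (m : Int) <;> intro hc
      · cases hc
      · exact ⟨_, rfl, hc⟩
    have hstep : pvColStepB so ch (some cols0) m = some (cols0.set m (cols0.getD m [] ++ [c])) := by
      simp [pvColStepB, hoff, -List.getD_eq_getElem?_getD, hsc]
    refine ⟨cols0.set m (cols0.getD m [] ++ [c]), ?_, by simp [hlen0], ?_⟩
    · rw [show List.range (m+1) = List.range m ++ [m] from List.range_succ, List.foldl_append,
        hfold]
      simp only [List.foldl_cons, List.foldl_nil]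
      exact hstep
    · intro t ht
      rw [List.getElem?_set]
      by_cases htm : t = m
      · subst htm
        rw [if_pos rfl, if_pos (by omega), if_pos (by omega)]
        have : cols0.getD t [] = cols.getD t [] := by
          rw [List.getD_eq_getElem?_getD, List.getD_eq_getElem?_getD, hget0 t ht,
            if_neg (by omega)]
        rw [this, hc]
        simp
      · rw [if_neg (fun h => htm h.symm), hget0 t ht]
        by_cases hlt : t < m
        · rw [if_pos hlt, if_pos (by omega)]
        · rw [if_neg hlt, if_neg (by omega)]

theorem foldB_all (so : List Int) :
    ∀ mc : List String,
    (∀ ch ∈ mc, ∀ i, i < min ch.toList.length 10 → ∃ c, pvShift so i ch.toList = some c) →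
    ∃ cols, mc.foldl (fun acc chunk =>
      (List.range (min chunk.toList.length pvKeyLen)).foldl (pvColStepB so chunk.toList) acc)
      (some (List.replicate pvKeyLen [])) = some cols ∧
    cols.length = 10 ∧ ∀ t, t < 10 → cols[t]? = some (pvCol so t mc) := by
  intro mc
  induction mc using List.reverseRecOn with
  | nil =>
    intro _
    refine ⟨List.replicate pvKeyLen [], by simp, by simp [pvKeyLen], ?_⟩
    intro t ht
    rw [List.getElem?_replicate, if_pos (by simpa [pvKeyLen] using ht)]
    simp [pvCol]
  | append_singleton mc ch ihm =>
    intro hs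
    obtain ⟨cols0, hfold, hlen0, hget0⟩ := ihm (fun x hx => hs x (by simp [hx]))
    have hsch := hs ch (by simp)
    obtain ⟨cols', hstep, hlen', hget'⟩ := foldB_inner so ch.toList
      (min ch.toList.length 10) (by omega) hsch cols0 hlen0
    refine ⟨cols', ?_, hlen', ?_⟩
    · rw [List.foldl_append, hfold]
      simp only [List.foldl_cons, List.foldl_nil]
      rw [show pvKeyLen = 10 from rfl]
      exact hstep
    · intro t ht
      rw [hget' t ht, pvCol_append]
      by_cases hq : t < ch.toList.length
      · rw [if_pos (by omega), if_pos hq]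
        obtain ⟨c, hc⟩ := hsch t (by omega)
        have : cols0.getD t [] = pvCol so t mc := by
          rw [List.getD_eq_getElem?_getD, hget0 t ht]
          rfl
        rw [this, hc]
        simp [Option.toList]
      · rw [if_neg (by omega), if_neg hq, hget0 t ht]
        simp

theorem flatten_flatMap {α β : Type} (g : α → List (List β)) (xs : List α) :
    (xs.flatMap g).flatten = xs.flatMap (fun x => (g x).flatten) := by
  induction xs with
  | nil => simp
  | cons a t ih => simp [ih]

theorem foldl_if_append_flatten (p : Nat → Prop) [DecidablePred p] (f : Nat → Char) :
    ∀ (ys : List Nat) (out : List Char),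
    ys.foldl (fun o i => if p i then o ++ [f i] else o) out =
      out ++ (ys.map (fun i => if p i then [f i] else [])).flatten := by
  intro ys
  induction ys with
  | nil => simp
  | cons a t ih =>
    intro out
    by_cases h : p a <;> simp [h, ih]

theorem shiftB_toList (so : List Int) (mc : List String)
    (hs : ∀ ch ∈ mc, ∀ i, i < min ch.toList.length 10 → ∃ c, pvShift so i ch.toList = some c) :
    (shift_msg_alt mc so).toList = (pvRows so mc).flatten := by
  obtain ⟨cols, hfold, hlen, hget⟩ := foldB_all so mc hs
  unfold shift_msg_alt
  rw [hfold]
  rw [show pvKeyLen = 10 from rfl]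
  simp only [String.toList_ofList]
  have hrow : ∀ (out : List Char) (row : Nat),
      (List.range 10).foldl (fun out2 i =>
        if row < (cols.getD i []).length then out2 ++ [(cols.getD i []).getD row ' '] else out2)
        out = out ++ ((List.range 10).map (fun i => pvPad (pvCol so i mc) row)).flatten := by
    intro out row
    rw [foldl_if_append_flatten (fun i => row < (cols.getD i []).length)
      (fun i => (cols.getD i []).getD row ' ')]
    congr 1
    congr 1
    apply List.map_congr_left
    intro i hi
    have hcols : cols.getD i [] = pvCol so i mc := by
      rw [List.getD_eq_getElem?_getD, hget i (List.mem_range.mp hi)]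
      rfl
    rw [pvPad, hcols]
  have houter : (List.range mc.length).foldl (fun out row =>
      (List.range 10).foldl (fun out2 i =>
        if row < (cols.getD i []).length then out2 ++ [(cols.getD i []).getD row ' '] else out2)
        out) [] = (List.range mc.length).flatMap
        (fun row => ((List.range 10).map (fun i => pvPad (pvCol so i mc) row)).flatten) := by
    rw [List.flatMap_eq_foldl]
    apply PySem.List.foldl_congr_mem
    intro acc row _
    exact hrow acc row
  rw [houter, pvRows, flatten_flatMap]

-- ===== VERDICT (by name: the statement is the Claim_ definition above) =====
theorem shift_msg_spec : Claim_equal_shift_msg := by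
  intro mc so _ hpre
  unfold Spec_shift_msg
  apply String.toList_inj.mp
  rw [shiftA_toList so mc (fun i hi ch hch hil => pvShift_some so mc hpre ch hch i hil hi),
    shiftB_toList so mc (fun ch hch i hi => pvShift_some so mc hpre ch hch i (by omega)
      (by simp only [pvKeyLen]; omega))]
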